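-- pv_equiv track=rewrite | github.com/colding10/cp-notebook | solutions/usaco-training/2.2/Runaround Numbers/runround.py | isRunaround
-- ===== SOURCE A (Python) =====
-- def isRunaround(n):
--     string_n = str(n)
--     dict_string_n = {i:0 for i in range(len(string_n))}
--
--     if len(set(string_n)) != len(string_n):
--         return False
--     current_index = 0
--     digit = string_n[0]
--     for _ in range(len(string_n) * 4):
--         new_index = (current_index + int(digit)) % len(string_n)
--         digit = string_n[new_index]
--         dict_string_n[new_index] += 1
--         current_index = new_index
--         if 0 not in dict_string_n.values():
--             break
--     for val in dict_string_n.values():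
--         if val != 1:
--             return False
--
--     if digit == string_n[0]:
--         return True
--     return False
-- ===== SOURCE B (Python) =====
-- def isRunaround(n):
--     s = str(n)
--     L = len(s)
--     if len(set(s)) != L:
--         return False
--     seen = set()
--     idx = 0
--     while idx not in seen:
--         seen.add(idx)
--         idx = (idx + int(s[idx])) % L
--     return idx == 0 and len(seen) == L
-- ===== Notes on version B (the rewrite author's own statement) =====
-- stated objective: simpler
-- what changed: Replaced A's fixed quadruple-length counting loop with a per-index visit-count dict, break-on-full-coverage and final all-counts-equal-one plus digit-equality checks by a while-until-revisit walk of the jump orbit with a seen-set, returning whether the first revisited index is the start index with every index seen.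
import Mathlib
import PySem

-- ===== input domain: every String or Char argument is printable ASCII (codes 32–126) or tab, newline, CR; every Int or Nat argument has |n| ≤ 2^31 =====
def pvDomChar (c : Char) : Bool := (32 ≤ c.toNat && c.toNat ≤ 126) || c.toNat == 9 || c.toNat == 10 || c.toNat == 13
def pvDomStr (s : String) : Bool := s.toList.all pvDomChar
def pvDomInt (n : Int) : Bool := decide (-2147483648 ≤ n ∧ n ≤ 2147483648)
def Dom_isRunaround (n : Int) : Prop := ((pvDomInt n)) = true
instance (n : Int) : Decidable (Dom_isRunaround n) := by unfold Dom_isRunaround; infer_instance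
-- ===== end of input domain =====

-- B replaces A's fixed range(len*4) visit-count loop with a while-until-revisit orbit walk over a seen-set (objective: simpler).

-- ===== PORT A =====
-- {i: 0 for i in range(len(string_n))}
def pvInitDict (L : Int) : PySem.Dict Int Int :=
  (PySem.List.pyRange 0 L).foldl (fun d i => d.insert i 0) PySem.Dict.empty

-- the 'for _ in range(len*4)' loop with its break; fuel counts the remaining iterations.
-- Inside Pre_, new_index = (…) % len lies in [0, len), so string_n[new_index] exists (the .getD ' '
-- default is unreachable), int(digit) succeeds (the .getD 0 default is unreachable), and
-- dict_string_n[new_index] += 1 finds its key present (Dict.modify with default 0 agrees there).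
def pvALoop (s : List Char) (L : Int) : Nat → Int → Char → PySem.Dict Int Int → Char × PySem.Dict Int Int
  | 0, _, digit, d => (digit, d)
  | fuel + 1, cur, digit, d =>
      let ni := PySem.Int.mod (cur + (PySem.Int.ofChars? [digit]).getD 0) L
      let digit' := (PySem.List.pyGet? s ni).getD ' '
      let d' := d.modify ni 0 (· + 1)
      if d'.values.contains 0 then pvALoop s L fuel ni digit' d' else (digit', d')

def isRunaround (n : Int) : Bool :=
  let s := PySem.Int.toChars n
  let L : Int := (s.length : Int)
  if PySem.Set.len (PySem.Set.ofList s) ≠ L then false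
  else
    let digit0 := (PySem.List.pyGet? s 0).getD ' '
    let r := pvALoop s L (s.length * 4) 0 digit0 (pvInitDict L)
    if r.2.values.any (fun v => v != 1) then false
    else if r.1 == digit0 then true else false

-- ===== PORT B =====
-- 'while idx not in seen': each iteration adds a fresh index of the string to seen, so the loop
-- stops within len(s)+1 iterations and the fuel len(s)+1 is never exhausted (proved below).
def pvBLoop (s : List Char) (L : Int) : Nat → PySem.Set Int → Int → PySem.Set Int × Int
  | 0, seen, idx => (seen, idx)
  | fuel + 1, seen, idx =>
      if PySem.Set.contains seen idx then (seen, idx)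
      else pvBLoop s L fuel (PySem.Set.add seen idx)
             (PySem.Int.mod (idx + (PySem.Int.ofChars? [(PySem.List.pyGet? s idx).getD ' ']).getD 0) L)

def isRunaround_alt (n : Int) : Bool :=
  let s := PySem.Int.toChars n
  let L : Int := (s.length : Int)
  if PySem.Set.len (PySem.Set.ofList s) ≠ L then false
  else
    let r := pvBLoop s L (s.length + 1) PySem.Set.empty 0
    r.2 == 0 && PySem.Set.len r.1 == L

-- ===== PRECONDITION & SPEC =====
-- Pre_ excludes exactly the inputs where A raises: for negative n whose str(n) has all-distinct
-- characters the distinctness guard passes and int('-') raises ValueError (B raises identically there).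
def Pre_isRunaround (n : Int) : Prop := 0 ≤ n ∨ ¬ (PySem.Int.toChars n).Nodup
instance (n : Int) : Decidable (Pre_isRunaround n) := by unfold Pre_isRunaround; infer_instance
def pvWitness_isRunaround : Int := (81)

def Spec_isRunaround (n : Int) (out : Bool) : Prop := out = isRunaround_alt n
instance (n : Int) (out : Bool) : Decidable (Spec_isRunaround n out) := by unfold Spec_isRunaround; infer_instance

-- ===== CLAIM (what is proved, stated in full; the proofs are below) =====
def Claim_equal_isRunaround : Prop := ∀ (n : Int), Dom_isRunaround n → Pre_isRunaround n → Spec_isRunaround n (isRunaround n)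

-- ===== LEMMAS AND PROOFS =====

-- the jump orbit both programs follow: index 0, then repeatedly i ↦ (i + int(s[i])) % len(s)
def pvCharAt (s : List Char) (i : Int) : Char := (PySem.List.pyGet? s i).getD ' '
def pvStep (s : List Char) (i : Int) : Int :=
  PySem.Int.mod (i + (PySem.Int.ofChars? [pvCharAt s i]).getD 0) (s.length : Int)
def pvOrb (s : List Char) : Nat → Int
  | 0 => 0
  | t + 1 => pvStep s (pvOrb s t)
-- the indices visited by the first t loop iterations (A increments counts exactly at these)
def pvSeg (s : List Char) (t : Nat) : List Int := (List.range t).map (fun i => pvOrb s (i + 1))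
-- the indices B's seen-set holds after t iterations
def pvSeen (s : List Char) (t : Nat) : List Int := (List.range t).map (pvOrb s)
-- A's dict after t loop iterations
def pvD (s : List Char) (t : Nat) : PySem.Dict Int Int :=
  (pvSeg s t).foldl (fun d x => d.modify x 0 (· + 1)) (pvInitDict (s.length : Int))
-- the common characterisation: the orbit is one full cycle through all indices
def pvC (s : List Char) : Prop :=
  (pvSeg s s.length).Nodup ∧ (∀ j < s.length, ((j : Nat) : Int) ∈ pvSeg s s.length) ∧
    pvOrb s s.length = 0

lemma pvSeg_succ (s : List Char) (t : Nat) :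
    pvSeg s (t + 1) = pvSeg s t ++ [pvOrb s (t + 1)] := by
  simp [pvSeg, List.range_succ]

lemma pvSeen_succ (s : List Char) (t : Nat) :
    pvSeen s (t + 1) = pvSeen s t ++ [pvOrb s t] := by
  simp [pvSeen, List.range_succ]

lemma pvSeen_succ_cons (s : List Char) (t : Nat) :
    pvSeen s (t + 1) = 0 :: pvSeg s t := by
  simp [pvSeen, pvSeg, List.range_succ_eq_map, List.map_map, Function.comp, pvOrb]

lemma pvSeg_length (s : List Char) (t : Nat) : (pvSeg s t).length = t := by simp [pvSeg]

lemma pvSeen_length (s : List Char) (t : Nat) : (pvSeen s t).length = t := by simp [pvSeen]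

lemma pvSeg_getElem (s : List Char) (t m : Nat) (h : m < t) :
    (pvSeg s t)[m]'(by simpa [pvSeg_length] using h) = pvOrb s (m + 1) := by
  simp [pvSeg]

lemma pvOrb_bounds (s : List Char) (hne : s ≠ []) (t : Nat) :
    0 ≤ pvOrb s t ∧ pvOrb s t < (s.length : Int) := by
  have hL : (0 : Int) < (s.length : Int) := by
    have := List.length_pos_of_ne_nil hne
    exact_mod_cast this
  cases t with
  | zero => exact ⟨le_refl 0, hL⟩
  | succ t => exact ⟨PySem.Int.mod_nonneg _ hL, PySem.Int.mod_lt _ hL⟩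

lemma pvCharAt_inj (s : List Char) (hnd : s.Nodup) {i j : Int}
    (hi0 : 0 ≤ i) (hi1 : i < (s.length : Int)) (hj0 : 0 ≤ j) (hj1 : j < (s.length : Int))
    (h : pvCharAt s i = pvCharAt s j) : i = j := by
  have hi2 : i.toNat < s.length := by omega
  have hj2 : j.toNat < s.length := by omega
  have hi' : i = ((i.toNat : Nat) : Int) := by omega
  have hj' : j = ((j.toNat : Nat) : Int) := by omega
  rw [hi', hj'] at h
  unfold pvCharAt at h
  rw [PySem.List.pyGet?_natCast, PySem.List.pyGet?_natCast,
    List.getElem?_eq_getElem hi2, List.getElem?_eq_getElem hj2] at h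
  simp only [Option.getD_some] at h
  have := (hnd.getElem_inj_iff (hi := hi2) (hj := hj2)).mp h
  omega

lemma pvGetD_insert_zero_fold (l : List Int) (d : PySem.Dict Int Int)
    (h : ∀ j, d.getD j 0 = 0) (j : Int) :
    (l.foldl (fun d i => d.insert i 0) d).getD j 0 = 0 := by
  induction l generalizing d with
  | nil => exact h j
  | cons x l ih =>
      refine ih _ (fun j => ?_)
      by_cases hx : j = x
      · subst hx; exact PySem.Dict.getD_insert_self _ _ _ _
      · rw [PySem.Dict.getD_insert_of_ne _ _ _ hx]; exact h j

lemma pvInitDict_getD (L : Int) (j : Int) : (pvInitDict L).getD j 0 = 0 := by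
  refine pvGetD_insert_zero_fold _ _ (fun j => ?_) j
  rfl

lemma pvContains_iff (l : List Int) (x : Int) : PySem.Set.contains l x = true ↔ x ∈ l := by
  simp [PySem.Set.contains]

lemma pvSet_update_eq_self (xs : List Int) (s0 : PySem.Set Int)
    (h : ∀ x ∈ xs, x ∈ s0) : PySem.Set.update s0 xs = s0 := by
  induction xs generalizing s0 with
  | nil => rfl
  | cons x xs ih =>
      have hx : PySem.Set.add s0 x = s0 := by
        have hcon : PySem.Set.contains s0 x = true :=
          (pvContains_iff _ _).mpr (h x List.mem_cons_self)
        unfold PySem.Set.add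
        rw [if_pos hcon]
      show PySem.Set.update (PySem.Set.add s0 x) xs = s0
      rw [hx]
      exact ih s0 (fun y hy => h y (by simp [hy]))

lemma pvInitDict_keys (s : List Char) :
    (pvInitDict (s.length : Int)).keys = List.map (fun k : Nat => (k : Int)) (List.range s.length) := by
  unfold pvInitDict
  rw [PySem.Dict.keys_foldl_insert _ (fun _ _ => 0)]
  rw [show (PySem.Dict.empty : PySem.Dict Int Int).keys = [] from rfl]
  rw [show PySem.Set.update ([] : PySem.Set Int) (PySem.List.pyRange 0 (s.length : Int)) =
    PySem.Set.ofList (PySem.List.pyRange 0 (s.length : Int)) from rfl]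
  rw [PySem.List.pyRange_zero_natCast]
  exact PySem.Set.ofList_eq_self_of_nodup _ (List.nodup_range.map Nat.cast_injective)

lemma pvSeg_sub (s : List Char) (hne : s ≠ []) (t : Nat) :
    ∀ x ∈ pvSeg s t, ∃ j, j < s.length ∧ x = (j : Int) := by
  intro x hx
  simp only [pvSeg, List.mem_map, List.mem_range] at hx
  obtain ⟨i, _, rfl⟩ := hx
  obtain ⟨h0, h1⟩ := pvOrb_bounds s hne (i + 1)
  exact ⟨(pvOrb s (i + 1)).toNat, by omega, by omega⟩

lemma pvD_keys (s : List Char) (hne : s ≠ []) (t : Nat) :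
    (pvD s t).keys = List.map (fun k : Nat => (k : Int)) (List.range s.length) := by
  unfold pvD
  rw [PySem.Dict.keys_foldl_modify _ 0 (fun _ _ => (· + 1)), pvInitDict_keys]
  refine pvSet_update_eq_self _ _ (fun x hx => ?_)
  obtain ⟨j, hj, rfl⟩ := pvSeg_sub s hne t x hx
  exact List.mem_map.mpr ⟨j, List.mem_range.mpr hj, rfl⟩

lemma pvD_getD (s : List Char) (t : Nat) (j : Int) :
    (pvD s t).getD j 0 = ((pvSeg s t).count j : Int) := by
  unfold pvD
  rw [PySem.Dict.getD_foldl_modify_add_one, pvInitDict_getD]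
  ring

lemma pvD_succ (s : List Char) (t : Nat) :
    pvD s (t + 1) = (pvD s t).modify (pvOrb s (t + 1)) 0 (· + 1) := by
  unfold pvD
  rw [pvSeg_succ, List.foldl_append]
  rfl

lemma pvD_values_contains0 (s : List Char) (hne : s ≠ []) (t : Nat) :
    ((pvD s t).values.contains (0 : Int) = true) ↔
      ∃ j < s.length, (pvSeg s t).count ((j : Nat) : Int) = 0 := by
  have hknd : (pvD s t).keys.Nodup := by
    rw [pvD_keys s hne t]
    exact List.nodup_range.map Nat.cast_injective
  have hval : (pvD s t).values =
      (List.range s.length).map (fun j => (((pvSeg s t).count ((j : Nat) : Int) : Nat) : Int)) := by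
    rw [PySem.Dict.values_eq_map_keys _ hknd 0, pvD_keys s hne t, List.map_map]
    simp [pvD_getD]
  rw [hval]
  simp [List.mem_map, List.mem_range]

lemma pvD_values_all1 (s : List Char) (hne : s ≠ []) (t : Nat) :
    ((pvD s t).values.any (fun v => v != 1) = false) ↔
      ∀ j < s.length, (pvSeg s t).count ((j : Nat) : Int) = 1 := by
  have hknd : (pvD s t).keys.Nodup := by
    rw [pvD_keys s hne t]
    exact List.nodup_range.map Nat.cast_injective
  have hval : (pvD s t).values =
      (List.range s.length).map (fun j => (((pvSeg s t).count ((j : Nat) : Int) : Nat) : Int)) := by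
    rw [PySem.Dict.values_eq_map_keys _ hknd 0, pvD_keys s hne t, List.map_map]
    simp [pvD_getD]
  rw [hval]
  simp [List.any_eq_false, List.mem_range]

-- cardinality helpers
lemma pv_length_le (l : List Int) (L : Nat) (hnd : l.Nodup)
    (hsub : ∀ x ∈ l, ∃ j, j < L ∧ x = (j : Int)) : l.length ≤ L := by
  classical
  have h1 : l.toFinset.card = l.length := List.toFinset_card_of_nodup hnd
  have h2 : l.toFinset ⊆ Finset.image (fun j : Nat => (j : Int)) (Finset.range L) := by
    intro x hx
    obtain ⟨j, hj, rfl⟩ := hsub x (List.mem_toFinset.mp hx)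
    exact Finset.mem_image.mpr ⟨j, Finset.mem_range.mpr hj, rfl⟩
  have h3 : (Finset.image (fun j : Nat => (j : Int)) (Finset.range L)).card = L := by
    rw [Finset.card_image_of_injective _ Nat.cast_injective, Finset.card_range]
  have := Finset.card_le_card h2
  omega

lemma pv_cover (l : List Int) (L : Nat) (hnd : l.Nodup) (hlen : l.length = L)
    (hsub : ∀ x ∈ l, ∃ j, j < L ∧ x = (j : Int)) : ∀ j < L, ((j : Nat) : Int) ∈ l := by
  classical
  have h1 : l.toFinset.card = L := by rw [List.toFinset_card_of_nodup hnd, hlen]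
  have h2 : l.toFinset ⊆ Finset.image (fun j : Nat => (j : Int)) (Finset.range L) := by
    intro x hx
    obtain ⟨j, hj, rfl⟩ := hsub x (List.mem_toFinset.mp hx)
    exact Finset.mem_image.mpr ⟨j, Finset.mem_range.mpr hj, rfl⟩
  have h3 : (Finset.image (fun j : Nat => (j : Int)) (Finset.range L)).card = L := by
    rw [Finset.card_image_of_injective _ Nat.cast_injective, Finset.card_range]
  have heq : l.toFinset = Finset.image (fun j : Nat => (j : Int)) (Finset.range L) :=
    Finset.eq_of_subset_of_card_le h2 (by omega)
  intro j hj
  have : ((j : Nat) : Int) ∈ l.toFinset := by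
    rw [heq]
    exact Finset.mem_image.mpr ⟨j, Finset.mem_range.mpr hj, rfl⟩
  exact List.mem_toFinset.mp this

lemma pv_missing (s : List Char) (hne : s ≠ []) (t : Nat) (h : t < s.length) :
    ∃ j < s.length, (pvSeg s t).count ((j : Nat) : Int) = 0 := by
  classical
  by_contra hcon
  simp only [not_exists, not_and] at hcon
  have hmem : ∀ j < s.length, ((j : Nat) : Int) ∈ pvSeg s t := by
    intro j hj
    exact List.count_pos_iff.mp (Nat.pos_of_ne_zero (hcon j hj))
  have h2 : Finset.image (fun j : Nat => (j : Int)) (Finset.range s.length) ⊆ (pvSeg s t).toFinset := by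
    intro x hx
    obtain ⟨j, hj, rfl⟩ := Finset.mem_image.mp hx
    exact List.mem_toFinset.mpr (hmem j (Finset.mem_range.mp hj))
  have h3 : (Finset.image (fun j : Nat => (j : Int)) (Finset.range s.length)).card = s.length := by
    rw [Finset.card_image_of_injective _ Nat.cast_injective, Finset.card_range]
  have h4 := Finset.card_le_card h2
  have h5 := List.toFinset_card_le (pvSeg s t)
  rw [pvSeg_length] at h5
  omega

lemma pv_counts_one (s : List Char) (hne : s ≠ []) (t : Nat)
    (h : ∀ j < s.length, (pvSeg s t).count ((j : Nat) : Int) = 1) :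
    t = s.length ∧ (pvSeg s t).Nodup ∧ ∀ j < s.length, ((j : Nat) : Int) ∈ pvSeg s t := by
  classical
  have hsub := pvSeg_sub s hne t
  have hnd : (pvSeg s t).Nodup := by
    rw [List.nodup_iff_count_le_one]
    intro a
    by_cases ha : a ∈ pvSeg s t
    · obtain ⟨j, hj, rfl⟩ := hsub a ha
      rw [h j hj]
    · rw [List.count_eq_zero.mpr ha]
      omega
  have hle : (pvSeg s t).length ≤ s.length := pv_length_le _ _ hnd hsub
  have hmem : ∀ j < s.length, ((j : Nat) : Int) ∈ pvSeg s t := by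
    intro j hj
    exact List.count_pos_iff.mp (by rw [h j hj]; omega)
  have h2 : Finset.image (fun j : Nat => (j : Int)) (Finset.range s.length) ⊆ (pvSeg s t).toFinset := by
    intro x hx
    obtain ⟨j, hj, rfl⟩ := Finset.mem_image.mp hx
    exact List.mem_toFinset.mpr (hmem j (Finset.mem_range.mp hj))
  have h3 : (Finset.image (fun j : Nat => (j : Int)) (Finset.range s.length)).card = s.length := by
    rw [Finset.card_image_of_injective _ Nat.cast_injective, Finset.card_range]
  have h4 := Finset.card_le_card h2
  have h5 := List.toFinset_card_le (pvSeg s t)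
  rw [pvSeg_length] at h5 hle
  exact ⟨by omega, hnd, hmem⟩

lemma pv_counts_of_C (s : List Char) (hC : pvC s) :
    ∀ j < s.length, (pvSeg s s.length).count ((j : Nat) : Int) = 1 := by
  intro j hj
  have hle := List.nodup_iff_count_le_one.mp hC.1 ((j : Nat) : Int)
  have hpos := List.count_pos_iff.mpr (hC.2.1 j hj)
  omega

-- ===== A-side evaluation =====

lemma pvALoop_exists (s : List Char) (fuel : Nat) : ∀ t : Nat,
    ∃ T, t ≤ T ∧ pvALoop s (s.length : Int) fuel (pvOrb s t) (pvCharAt s (pvOrb s t)) (pvD s t) =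
      (pvCharAt s (pvOrb s T), pvD s T) := by
  induction fuel with
  | zero => intro t; exact ⟨t, le_refl t, rfl⟩
  | succ fuel ih =>
      intro t
      show ∃ T, t ≤ T ∧ (if ((pvD s t).modify (pvStep s (pvOrb s t)) 0 (· + 1)).values.contains 0 then
          pvALoop s (s.length : Int) fuel (pvStep s (pvOrb s t)) (pvCharAt s (pvStep s (pvOrb s t)))
            ((pvD s t).modify (pvStep s (pvOrb s t)) 0 (· + 1))
        else (pvCharAt s (pvStep s (pvOrb s t)), (pvD s t).modify (pvStep s (pvOrb s t)) 0 (· + 1))) =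
        (pvCharAt s (pvOrb s T), pvD s T)
      rw [show pvStep s (pvOrb s t) = pvOrb s (t + 1) from rfl, ← pvD_succ]
      by_cases hc : (pvD s (t + 1)).values.contains (0 : Int) = true
      · obtain ⟨T, hT, hres⟩ := ih (t + 1)
        exact ⟨T, by omega, by rw [if_pos hc]; exact hres⟩
      · exact ⟨t + 1, by omega, by rw [if_neg hc]⟩

lemma pvALoop_to_L (s : List Char) (hne : s ≠ []) (hC : pvC s) : ∀ fuel t : Nat,
    t < s.length → s.length ≤ t + fuel →
    pvALoop s (s.length : Int) fuel (pvOrb s t) (pvCharAt s (pvOrb s t)) (pvD s t) =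
      (pvCharAt s (pvOrb s s.length), pvD s s.length) := by
  intro fuel
  induction fuel with
  | zero => intro t h1 h2; omega
  | succ fuel ih =>
      intro t h1 h2
      show (if ((pvD s t).modify (pvStep s (pvOrb s t)) 0 (· + 1)).values.contains 0 then
          pvALoop s (s.length : Int) fuel (pvStep s (pvOrb s t)) (pvCharAt s (pvStep s (pvOrb s t)))
            ((pvD s t).modify (pvStep s (pvOrb s t)) 0 (· + 1))
        else (pvCharAt s (pvStep s (pvOrb s t)), (pvD s t).modify (pvStep s (pvOrb s t)) 0 (· + 1))) =
        (pvCharAt s (pvOrb s s.length), pvD s s.length)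
      rw [show pvStep s (pvOrb s t) = pvOrb s (t + 1) from rfl, ← pvD_succ]
      by_cases hlt : t + 1 < s.length
      · have hc : (pvD s (t + 1)).values.contains (0 : Int) = true := by
          rw [pvD_values_contains0 s hne]
          exact pv_missing s hne (t + 1) hlt
        rw [if_pos hc]
        exact ih (t + 1) hlt (by omega)
      · have heq : t + 1 = s.length := by omega
        have hc : ¬ ((pvD s (t + 1)).values.contains (0 : Int) = true) := by
          rw [pvD_values_contains0 s hne]
          simp only [not_exists, not_and]
          intro j hj
          have := pv_counts_of_C s hC j hj
          rw [heq]
          omega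
        rw [if_neg hc, heq]

-- ===== B-side evaluation =====

lemma pvBLoop_exists (s : List Char) (fuel : Nat) : ∀ t : Nat, (pvSeen s t).Nodup →
    ∃ m, t ≤ m ∧ (pvSeen s m).Nodup ∧
      pvBLoop s (s.length : Int) fuel (pvSeen s t) (pvOrb s t) = (pvSeen s m, pvOrb s m) := by
  induction fuel with
  | zero => intro t h; exact ⟨t, le_refl t, h, rfl⟩
  | succ fuel ih =>
      intro t hnd
      show ∃ m, t ≤ m ∧ (pvSeen s m).Nodup ∧
        (if PySem.Set.contains (pvSeen s t) (pvOrb s t) then (pvSeen s t, pvOrb s t)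
         else pvBLoop s (s.length : Int) fuel (PySem.Set.add (pvSeen s t) (pvOrb s t))
                (pvStep s (pvOrb s t))) = (pvSeen s m, pvOrb s m)
      by_cases hc : PySem.Set.contains (pvSeen s t) (pvOrb s t) = true
      · exact ⟨t, le_refl t, hnd, by rw [if_pos hc]⟩
      · have hadd : PySem.Set.add (pvSeen s t) (pvOrb s t) = pvSeen s (t + 1) := by
          rw [pvSeen_succ]
          unfold PySem.Set.add
          rw [if_neg hc]
        have hmem : pvOrb s t ∉ pvSeen s t := fun hm => hc ((pvContains_iff _ _).mpr hm)
        have hnd' : (pvSeen s (t + 1)).Nodup := by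
          rw [pvSeen_succ]
          refine List.Nodup.append hnd (List.nodup_singleton _) ?_
          intro a ha hb
          rw [List.mem_singleton] at hb
          subst hb
          exact hmem ha
        obtain ⟨m, hm, hnd'', hres⟩ := ih (t + 1) hnd'
        refine ⟨m, by omega, hnd'', ?_⟩
        rw [if_neg hc, hadd]
        exact hres

lemma pvOrb_shift (s : List Char) {i j : Nat} (h : pvOrb s i = pvOrb s j) :
    ∀ t, pvOrb s (i + t) = pvOrb s (j + t) := by
  intro t
  induction t with
  | zero => simpa using h
  | succ t ih =>
      show pvOrb s ((i + t) + 1) = pvOrb s ((j + t) + 1)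
      show pvStep s (pvOrb s (i + t)) = pvStep s (pvOrb s (j + t))
      rw [ih]

lemma pvOrb_inj_of_C (s : List Char) (hC : pvC s) :
    ∀ i j, i < s.length → j < s.length → pvOrb s i = pvOrb s j → i = j := by
  have key : ∀ i j, i < j → j < s.length → pvOrb s i = pvOrb s j → False := by
    intro i j hij hj h
    have hL0 := hC.2.2
    have h2 : pvOrb s (i + (s.length - j)) = pvOrb s (j + (s.length - j)) := pvOrb_shift s h _
    rw [show j + (s.length - j) = s.length by omega, hL0] at h2
    have hk1 : 1 ≤ i + (s.length - j) := by omega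
    have hk2 : i + (s.length - j) < s.length := by omega
    have hgk : (pvSeg s s.length)[i + (s.length - j) - 1]'(by
        simpa [pvSeg_length] using by omega) = (0 : Int) := by
      rw [pvSeg_getElem s _ _ (by omega : i + (s.length - j) - 1 < s.length)]
      rw [show i + (s.length - j) - 1 + 1 = i + (s.length - j) by omega, h2]
    have hgL : (pvSeg s s.length)[s.length - 1]'(by
        simpa [pvSeg_length] using by omega) = (0 : Int) := by
      rw [pvSeg_getElem s _ _ (by omega : s.length - 1 < s.length)]
      rw [show s.length - 1 + 1 = s.length by omega, hL0]
    have := (hC.1.getElem_inj_iff).mp (hgk.trans hgL.symm)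
    omega
  intro i j hi hj h
  rcases Nat.lt_trichotomy i j with hlt | heq | hgt
  · exact absurd (key i j hlt hj h) (by simp)
  · exact heq
  · exact absurd (key j i hgt hi h.symm) (by simp)

lemma pvC_of_seen (s : List Char) (hne : s ≠ []) (hnd : (pvSeen s s.length).Nodup)
    (h0 : pvOrb s s.length = 0) : pvC s := by
  have hL1 : 0 < s.length := List.length_pos_of_ne_nil hne
  obtain ⟨L', hL'⟩ : ∃ L', s.length = L' + 1 := ⟨s.length - 1, by omega⟩
  have h1 : pvSeen s s.length = 0 :: pvSeg s L' := by rw [hL']; exact pvSeen_succ_cons s L'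
  have h2 : pvSeg s s.length = pvSeg s L' ++ [(0 : Int)] := by
    conv_lhs => rw [hL', pvSeg_succ, ← hL', h0]
  have hperm : (pvSeg s s.length).Perm (pvSeen s s.length) := by
    rw [h1, h2]
    exact List.perm_append_singleton 0 _
  have hndseg : (pvSeg s s.length).Nodup := hperm.nodup_iff.mpr hnd
  exact ⟨hndseg, pv_cover _ _ hndseg (pvSeg_length s _) (pvSeg_sub s hne _), h0⟩

lemma pvBLoop_to_L (s : List Char) (hne : s ≠ []) (hC : pvC s) : ∀ fuel t : Nat,
    t ≤ s.length → s.length + 1 ≤ t + fuel →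
    pvBLoop s (s.length : Int) fuel (pvSeen s t) (pvOrb s t) =
      (pvSeen s s.length, pvOrb s s.length) := by
  intro fuel
  induction fuel with
  | zero => intro t h1 h2; omega
  | succ fuel ih =>
      intro t h1 h2
      show (if PySem.Set.contains (pvSeen s t) (pvOrb s t) then (pvSeen s t, pvOrb s t)
         else pvBLoop s (s.length : Int) fuel (PySem.Set.add (pvSeen s t) (pvOrb s t))
                (pvStep s (pvOrb s t))) = (pvSeen s s.length, pvOrb s s.length)
      by_cases heq : t = s.length
      · have hc : PySem.Set.contains (pvSeen s t) (pvOrb s t) = true := by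
          rw [pvContains_iff, heq, hC.2.2]
          show pvOrb s 0 ∈ pvSeen s s.length
          simp only [pvSeen, List.mem_map, List.mem_range]
          exact ⟨0, List.length_pos_of_ne_nil hne, rfl⟩
        rw [if_pos hc, heq]
      · have hlt : t < s.length := by omega
        have hmem : pvOrb s t ∉ pvSeen s t := by
          intro hmem
          simp only [pvSeen, List.mem_map, List.mem_range] at hmem
          obtain ⟨i, hi, hoi⟩ := hmem
          have := pvOrb_inj_of_C s hC i t (by omega) hlt hoi
          omega
        have hc : ¬ PySem.Set.contains (pvSeen s t) (pvOrb s t) = true := fun hct =>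
          hmem ((pvContains_iff _ _).mp hct)
        rw [if_neg hc]
        have hadd : PySem.Set.add (pvSeen s t) (pvOrb s t) = pvSeen s (t + 1) := by
          rw [pvSeen_succ]
          simp only [PySem.Set.add]
          rw [if_neg hc]
        rw [hadd]
        exact ih (t + 1) (by omega) (by omega)

-- ===== guard =====

lemma pvOfList_len_iff (s : List Char) :
    (PySem.Set.ofList s).length = s.length ↔ s.Nodup := by
  classical
  constructor
  · intro h
    have hnd := PySem.Set.nodup_ofList s
    have hfin : (PySem.Set.ofList s : List Char).toFinset = s.toFinset := by
      ext x
      simp [List.mem_toFinset, PySem.Set.mem_ofList]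
    have h1 : s.toFinset.card = s.length := by
      rw [← hfin, List.toFinset_card_of_nodup hnd, h]
    rw [List.card_toFinset] at h1
    exact List.dedup_eq_self.mp ((List.dedup_sublist s).eq_of_length h1)
  · intro h
    rw [PySem.Set.ofList_eq_self_of_nodup s h]

lemma pvToDigits_ne_nil (b n : Nat) : Nat.toDigits b n ≠ [] := by
  show Nat.toDigitsCore b (n + 1) n [] ≠ []
  simp only [Nat.toDigitsCore]
  split
  · simp
  · intro hc
    have := Nat.toDigitsCore_lens_eq b n (n / b) (Nat.digitChar (n % b)) []
    rw [hc] at this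
    simp at this

lemma pvToChars_ne_nil (n : Int) : PySem.Int.toChars n ≠ [] := by
  unfold PySem.Int.toChars
  split
  · simp
  · exact pvToDigits_ne_nil 10 n.toNat

-- ===== assembling the two iffs =====

lemma pvA_true_iff (s : List Char) (hnd : s.Nodup) (hne : s ≠ []) :
    ((if ((pvALoop s (s.length : Int) (s.length * 4) 0 ((PySem.List.pyGet? s 0).getD ' ')
        (pvInitDict (s.length : Int))).2.values.any (fun v => v != 1)) then false
      else if (pvALoop s (s.length : Int) (s.length * 4) 0 ((PySem.List.pyGet? s 0).getD ' ')
        (pvInitDict (s.length : Int))).1 == ((PySem.List.pyGet? s 0).getD ' ') then true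
      else false) = true) ↔ pvC s := by
  have hL1 : 0 < s.length := List.length_pos_of_ne_nil hne
  constructor
  · intro h
    obtain ⟨T, hT, hres⟩ := pvALoop_exists s (s.length * 4) 0
    have hres' : pvALoop s (s.length : Int) (s.length * 4) 0 ((PySem.List.pyGet? s 0).getD ' ')
        (pvInitDict (s.length : Int)) = (pvCharAt s (pvOrb s T), pvD s T) := hres
    rw [hres'] at h
    have h' : (if ((pvD s T).values.any (fun v => v != 1)) then false
        else if (pvCharAt s (pvOrb s T) == pvCharAt s 0) then true else false) = true := h
    rcases Bool.eq_false_or_eq_true ((pvD s T).values.any (fun v => v != 1)) with hany | hany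
    · rw [if_pos hany] at h'
      exact absurd h' (by simp)
    · rw [if_neg (by rw [hany]; simp)] at h'
      rcases Bool.eq_false_or_eq_true (pvCharAt s (pvOrb s T) == pvCharAt s 0) with hch | hch
      swap
      · rw [if_neg (by rw [hch]; simp)] at h'
        exact absurd h' (by simp)
      · have hcounts := (pvD_values_all1 s hne T).mpr
        have hc1 : ∀ j < s.length, (pvSeg s T).count ((j : Nat) : Int) = 1 :=
          (pvD_values_all1 s hne T).mp hany
        obtain ⟨hTL, hndseg, hcov⟩ := pv_counts_one s hne T hc1
        have horb : pvOrb s T = 0 := by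
          refine pvCharAt_inj s hnd (pvOrb_bounds s hne T).1 (pvOrb_bounds s hne T).2
            (le_refl 0) (by exact_mod_cast hL1) ?_
          exact beq_iff_eq.mp hch
        subst hTL
        exact ⟨hndseg, hcov, horb⟩
  · intro hC
    have hrun : pvALoop s (s.length : Int) (s.length * 4) 0 ((PySem.List.pyGet? s 0).getD ' ')
        (pvInitDict (s.length : Int)) = (pvCharAt s (pvOrb s s.length), pvD s s.length) :=
      pvALoop_to_L s hne hC (s.length * 4) 0 hL1 (by omega)
    rw [hrun]
    show (if ((pvD s s.length).values.any (fun v => v != 1)) then false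
        else if (pvCharAt s (pvOrb s s.length) == pvCharAt s 0) then true else false) = true
    have hany : ((pvD s s.length).values.any (fun v => v != 1)) = false :=
      (pvD_values_all1 s hne _).mpr (pv_counts_of_C s hC)
    rw [if_neg (by rw [hany]; simp), if_pos (by rw [hC.2.2]; exact beq_self_eq_true _)]

lemma pvB_true_iff (s : List Char) (hnd : s.Nodup) (hne : s ≠ []) :
    (((pvBLoop s (s.length : Int) (s.length + 1) PySem.Set.empty 0).2 == 0 &&
      PySem.Set.len (pvBLoop s (s.length : Int) (s.length + 1) PySem.Set.empty 0).1 ==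
        (s.length : Int)) = true) ↔ pvC s := by
  have hL1 : 0 < s.length := List.length_pos_of_ne_nil hne
  constructor
  · intro h
    obtain ⟨m, hm, hndm, hres⟩ := pvBLoop_exists s (s.length + 1) 0 (by simp [pvSeen])
    have hres' : pvBLoop s (s.length : Int) (s.length + 1) PySem.Set.empty 0 =
        (pvSeen s m, pvOrb s m) := hres
    rw [hres'] at h
    have h' : (pvOrb s m == 0 && PySem.Set.len (pvSeen s m) == (s.length : Int)) = true := h
    rw [Bool.and_eq_true, beq_iff_eq, beq_iff_eq] at h'
    obtain ⟨h0, hlen⟩ := h'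
    have hm' : m = s.length := by
      have hl : ((pvSeen s m).length : Int) = (s.length : Int) := by
        simpa [PySem.Set.len] using hlen
      rw [pvSeen_length] at hl
      exact_mod_cast hl
    rw [hm'] at hndm h0
    exact pvC_of_seen s hne hndm h0
  · intro hC
    have hrun : pvBLoop s (s.length : Int) (s.length + 1) PySem.Set.empty 0 =
        (pvSeen s s.length, pvOrb s s.length) :=
      pvBLoop_to_L s hne hC (s.length + 1) 0 (by omega) (by omega)
    rw [hrun]
    show (pvOrb s s.length == 0 && PySem.Set.len (pvSeen s s.length) == (s.length : Int)) = true
    rw [hC.2.2, Bool.and_eq_true]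
    exact ⟨by simp, by simp [PySem.Set.len, pvSeen_length]⟩

-- ===== VERDICT (by name: the statement is the Claim_ definition above) =====
theorem isRunaround_spec : Claim_equal_isRunaround := by
  intro n _ _
  show isRunaround n = isRunaround_alt n
  by_cases hnd : (PySem.Int.toChars n).Nodup
  · have hne : PySem.Int.toChars n ≠ [] := pvToChars_ne_nil n
    have hguard : ¬ (PySem.Set.len (PySem.Set.ofList (PySem.Int.toChars n)) ≠
        (((PySem.Int.toChars n).length : Nat) : Int)) := by
      rw [PySem.Set.ofList_eq_self_of_nodup _ hnd]
      simp [PySem.Set.len]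
    unfold isRunaround isRunaround_alt
    simp only [if_neg hguard]
    have hA := pvA_true_iff (PySem.Int.toChars n) hnd hne
    have hB := pvB_true_iff (PySem.Int.toChars n) hnd hne
    rcases Bool.eq_false_or_eq_true (((pvBLoop (PySem.Int.toChars n) ((PySem.Int.toChars n).length : Int)
        ((PySem.Int.toChars n).length + 1) PySem.Set.empty 0).2 == 0 &&
      PySem.Set.len (pvBLoop (PySem.Int.toChars n) ((PySem.Int.toChars n).length : Int)
        ((PySem.Int.toChars n).length + 1) PySem.Set.empty 0).1 ==
        ((PySem.Int.toChars n).length : Int))) with hb | hb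
    · rw [hb, hA.mpr (hB.mp hb)]
    · rw [hb]
      rcases Bool.eq_false_or_eq_true ((if ((pvALoop (PySem.Int.toChars n) ((PySem.Int.toChars n).length : Int)
          ((PySem.Int.toChars n).length * 4) 0 ((PySem.List.pyGet? (PySem.Int.toChars n) 0).getD ' ')
          (pvInitDict ((PySem.Int.toChars n).length : Int))).2.values.any (fun v => v != 1)) then false
        else if (pvALoop (PySem.Int.toChars n) ((PySem.Int.toChars n).length : Int)
          ((PySem.Int.toChars n).length * 4) 0 ((PySem.List.pyGet? (PySem.Int.toChars n) 0).getD ' ')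
          (pvInitDict ((PySem.Int.toChars n).length : Int))).1 ==
            ((PySem.List.pyGet? (PySem.Int.toChars n) 0).getD ' ') then true
        else false)) with ha | ha
      · exact absurd (hB.mpr (hA.mp ha)) (by rw [hb]; simp)
      · exact ha
  · have hguard : PySem.Set.len (PySem.Set.ofList (PySem.Int.toChars n)) ≠
        (((PySem.Int.toChars n).length : Nat) : Int) := by
      intro h
      refine hnd ((pvOfList_len_iff (PySem.Int.toChars n)).mp ?_)
      simpa [PySem.Set.len] using h
    unfold isRunaround isRunaround_alt
    simp only [if_pos hguard]
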